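-- pv_equiv track=rewrite | github.com/zhicheng2T0/Full-Distance-Attack | color_mapping/2023_7_13_color_mapping.py | count_of_ways
-- ===== SOURCE A (Python) =====
-- def count_of_ways(n):
--     results=[]
--
--     count = 0
--     for i in range(0, n+1):
--         for j in range(0, n+1):
--             for k in range(0, n+1):
--                 if(i + j + k == n):
--                     count = count + 1
--                     results.append([i,j,k])
--     return results
-- ===== SOURCE B (Python) =====
-- def count_of_ways(n):
--     results = []
--     for i in range(0, n + 1):
--         for j in range(0, n - i + 1):
--             results.append([i, j, n - i - j])
--     return results
-- ===== Notes on version B (the rewrite author's own statement) =====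
-- stated objective: faster
-- what changed: Replaces the triple nested scan with a double loop that bounds j by n-i and computes k = n-i-j directly, eliminating the innermost O(n) search.
import Mathlib
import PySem

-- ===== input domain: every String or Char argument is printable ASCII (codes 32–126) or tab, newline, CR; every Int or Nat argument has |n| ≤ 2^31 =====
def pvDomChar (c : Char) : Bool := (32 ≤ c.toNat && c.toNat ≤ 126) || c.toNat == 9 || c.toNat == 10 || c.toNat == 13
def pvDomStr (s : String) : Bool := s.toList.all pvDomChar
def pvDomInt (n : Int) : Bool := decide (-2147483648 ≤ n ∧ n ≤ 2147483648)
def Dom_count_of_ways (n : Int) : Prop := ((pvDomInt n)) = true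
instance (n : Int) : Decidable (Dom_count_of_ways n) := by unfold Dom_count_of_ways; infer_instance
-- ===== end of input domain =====

-- B replaces A's triple nested scan by a double loop with k = n-i-j computed directly (asymptotically faster).

-- ===== PORT A =====
def count_of_ways (n : Int) : List (List Int) :=
  -- results=[]; count is dead state for the return value but is carried faithfully
  let init : List (List Int) × Int := ([], 0)
  let r :=
    (PySem.List.pyRange 0 (n+1) 1).foldl (fun st i =>
      (PySem.List.pyRange 0 (n+1) 1).foldl (fun st j =>
        (PySem.List.pyRange 0 (n+1) 1).foldl (fun st k =>
          if i + j + k == n then (st.1 ++ [[i, j, k]], st.2 + 1) else st) st) st) init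
  r.1

-- ===== PORT B =====
def count_of_ways_alt (n : Int) : List (List Int) :=
  (PySem.List.pyRange 0 (n+1) 1).foldl (fun results i =>
    (PySem.List.pyRange 0 (n - i + 1) 1).foldl (fun results j =>
      results ++ [[i, j, n - i - j]]) results) []

-- ===== PRECONDITION & SPEC =====
def Spec_count_of_ways (n : Int) (out : List (List Int)) : Prop := out = count_of_ways_alt n
instance (n : Int) (out : List (List Int)) : Decidable (Spec_count_of_ways n out) := by unfold Spec_count_of_ways; infer_instance

-- ===== CLAIM (what is proved, stated in full; the proofs are below) =====
def Claim_equal_count_of_ways : Prop := ∀ (n : Int), Dom_count_of_ways n → Spec_count_of_ways n (count_of_ways n)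

-- ===== LEMMAS AND PROOFS =====

theorem flatMap_eq_map_of_singleton {α β : Type} (l : List α) (f : α → List β) (g : α → β)
    (h : ∀ x ∈ l, f x = [g x]) : l.flatMap f = l.map g := by
  induction l with
  | nil => rfl
  | cons x xs ih =>
    simp only [List.flatMap_cons, List.map_cons, h x (by simp)]
    rw [ih (fun y hy => h y (by simp [hy]))]
    rfl

theorem flatMap_eq_nil_of_nil {α β : Type} (l : List α) (f : α → List β)
    (h : ∀ x ∈ l, f x = []) : l.flatMap f = [] := by
  simp [List.flatMap_eq_nil_iff]; exact h

-- the k-filter of A's innermost loop: the unique k with i+j+k = n, when it is in range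
theorem filter_pyRange_eq (a b c : Int) :
    (PySem.List.pyRange a b 1).filter (fun k => k == c) =
      if a ≤ c ∧ c < b then [c] else [] := by
  rw [List.filter_beq]
  by_cases h : a ≤ c ∧ c < b
  · have hm : c ∈ PySem.List.pyRange a b 1 := (PySem.List.mem_pyRange_one).mpr h
    rw [if_pos h, List.count_eq_one_of_mem (PySem.List.nodup_pyRange_one a b) hm]
    rfl
  · have hm : c ∉ PySem.List.pyRange a b 1 := fun hc => h ((PySem.List.mem_pyRange_one).mp hc)
    rw [if_neg h, List.count_eq_zero_of_not_mem hm]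
    rfl

-- A's nested foldl, first projection, as a flatMap over the filtered k-range
theorem countA_eq_flatMap (n : Int) :
    count_of_ways n =
      (PySem.List.pyRange 0 (n+1) 1).flatMap (fun i =>
        (PySem.List.pyRange 0 (n+1) 1).flatMap (fun j =>
          ((PySem.List.pyRange 0 (n+1) 1).filter (fun k => i + j + k == n)).map
            (fun k => [i, j, k]))) := by
  unfold count_of_ways
  -- peel the dead 'count' component: the first projection satisfies the append-if shape
  have key : ∀ (l : List Int) (f : Int → List (List Int) × Int → List (List Int) × Int)
      (g : Int → List (List Int) → List (List Int)),
      (∀ x st, (f x st).1 = g x st.1) →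
      ∀ st : List (List Int) × Int, (l.foldl (fun st x => f x st) st).1 =
        l.foldl (fun acc x => g x acc) st.1 := by
    intro l f g h
    induction l with
    | nil => intro st; rfl
    | cons x xs ih =>
      intro st
      simp only [List.foldl_cons]
      rw [ih ((f x st)), h x st]
  rw [key _ _ (fun i acc =>
        (PySem.List.pyRange 0 (n+1) 1).foldl (fun acc j =>
          (PySem.List.pyRange 0 (n+1) 1).foldl (fun acc k =>
            if i + j + k == n then acc ++ [[i, j, k]] else acc) acc) acc)
      ?_ (([], 0) : List (List Int) × Int)]
  · -- now a pure list foldl; rewrite with the loop-shape lemmas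
    have hk : ∀ (i j : Int) (acc : List (List Int)),
        (PySem.List.pyRange 0 (n+1) 1).foldl (fun acc k =>
            if i + j + k == n then acc ++ [[i, j, k]] else acc) acc =
          acc ++ ((PySem.List.pyRange 0 (n+1) 1).filter (fun k => i + j + k == n)).map
            (fun k => [i, j, k]) := by
      intro i j acc
      exact PySem.List.foldl_append_if _ _ _ _
    have hj : ∀ (i : Int) (acc : List (List Int)),
        (PySem.List.pyRange 0 (n+1) 1).foldl (fun acc j =>
            (PySem.List.pyRange 0 (n+1) 1).foldl (fun acc k =>
              if i + j + k == n then acc ++ [[i, j, k]] else acc) acc) acc =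
          acc ++ (PySem.List.pyRange 0 (n+1) 1).flatMap (fun j =>
            ((PySem.List.pyRange 0 (n+1) 1).filter (fun k => i + j + k == n)).map
              (fun k => [i, j, k])) := by
      intro i acc
      have h1 := PySem.List.foldl_congr_mem (PySem.List.pyRange 0 (n+1) 1)
        (fun acc j => (PySem.List.pyRange 0 (n+1) 1).foldl (fun acc k =>
          if i + j + k == n then acc ++ [[i, j, k]] else acc) acc)
        (fun acc j => acc ++ ((PySem.List.pyRange 0 (n+1) 1).filter
          (fun k => i + j + k == n)).map (fun k => [i, j, k]))
        acc (fun acc j _ => hk i j acc)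
      rw [h1]
      exact PySem.List.foldl_append_eq_flatMap _ _ _
    have h2 := PySem.List.foldl_congr_mem (PySem.List.pyRange 0 (n+1) 1)
      (fun acc i => (PySem.List.pyRange 0 (n+1) 1).foldl (fun acc j =>
        (PySem.List.pyRange 0 (n+1) 1).foldl (fun acc k =>
          if i + j + k == n then acc ++ [[i, j, k]] else acc) acc) acc)
      (fun acc i => acc ++ (PySem.List.pyRange 0 (n+1) 1).flatMap (fun j =>
        ((PySem.List.pyRange 0 (n+1) 1).filter (fun k => i + j + k == n)).map
          (fun k => [i, j, k])))
      [] (fun acc i _ => hj i acc)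
    rw [h2]
    exact PySem.List.foldl_append_eq_flatMap _ _ _
  · intro x st
    refine key _ _ _ (fun j st => ?_) st
    refine key _ _ _ (fun k st => ?_) st
    by_cases h : x + j + k == n <;> simp [h]

-- B's nested foldl as a flatMap of maps
theorem countB_eq_flatMap (n : Int) :
    count_of_ways_alt n =
      (PySem.List.pyRange 0 (n+1) 1).flatMap (fun i =>
        (PySem.List.pyRange 0 (n - i + 1) 1).map (fun j => [i, j, n - i - j])) := by
  unfold count_of_ways_alt
  have h1 := PySem.List.foldl_congr_mem (PySem.List.pyRange 0 (n+1) 1)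
    (fun results i => (PySem.List.pyRange 0 (n - i + 1) 1).foldl
      (fun results j => results ++ [[i, j, n - i - j]]) results)
    (fun results i => results ++ (PySem.List.pyRange 0 (n - i + 1) 1).map
      (fun j => [i, j, n - i - j]))
    [] (fun results i _ =>
      PySem.List.foldl_append_singleton_eq_map (fun j => [i, j, n - i - j])
        (PySem.List.pyRange 0 (n - i + 1) 1) results)
  rw [h1]
  exact PySem.List.foldl_append_eq_flatMap _ _ _

-- ===== VERDICT (by name: the statement is the Claim_ definition above) =====
theorem flatMap_congr_mem {α β : Type} (l : List α) (f g : α → List β)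
    (h : ∀ x ∈ l, f x = g x) : l.flatMap f = l.flatMap g := by
  induction l with
  | nil => rfl
  | cons x xs ih =>
    simp only [List.flatMap_cons, h x (by simp)]
    rw [ih (fun y hy => h y (by simp [hy]))]

theorem count_of_ways_spec : Claim_equal_count_of_ways := by
  intro n _
  unfold Spec_count_of_ways
  rw [countA_eq_flatMap, countB_eq_flatMap]
  apply flatMap_congr_mem
  intro i hi
  obtain ⟨hi0, hin⟩ := PySem.List.mem_pyRange_one.mp hi
  have hstep : ∀ j ∈ PySem.List.pyRange 0 (n+1) 1,
      ((PySem.List.pyRange 0 (n+1) 1).filter (fun k => i + j + k == n)).map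
        (fun k => [i, j, k]) =
      (if j ≤ n - i then [[i, j, n - i - j]] else []) := by
    intro j hj
    obtain ⟨hj0, hjn⟩ := PySem.List.mem_pyRange_one.mp hj
    have hfc : (PySem.List.pyRange 0 (n+1) 1).filter (fun k => i + j + k == n)
        = (PySem.List.pyRange 0 (n+1) 1).filter (fun k => k == n - i - j) := by
      apply List.filter_congr
      intro k _
      rw [Bool.eq_iff_iff]
      simp only [beq_iff_eq]
      omega
    rw [hfc, filter_pyRange_eq 0 (n+1) (n - i - j)]
    by_cases hc : j ≤ n - i
    · rw [if_pos ⟨by omega, by omega⟩, if_pos hc]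
      rfl
    · rw [if_neg (fun h => hc (by omega)), if_neg hc]
      rfl
  rw [flatMap_congr_mem _ _ _ hstep,
    PySem.List.pyRange_one_append 0 (n - i + 1) (n+1) (by omega) (by omega),
    List.flatMap_append,
    flatMap_eq_map_of_singleton _ _ (fun j => [i, j, n - i - j]) (fun j hj => by
      obtain ⟨h1, h2⟩ := PySem.List.mem_pyRange_one.mp hj
      rw [if_pos (by omega)]),
    flatMap_eq_nil_of_nil _ _ (fun j hj => by
      obtain ⟨h1, h2⟩ := PySem.List.mem_pyRange_one.mp hj
      rw [if_neg (by omega)]),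
    List.append_nil]
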